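-- pv_equiv track=rewrite | github.com/micheleAlberto/trackClosure | trackClosure/src/trackAnalysis/trackAnalisys.py | observations_strict
-- ===== SOURCE A (Python) =====
-- from collections import Counter, namedtuple
-- from itertools import combinations
--
-- Shadow=namedtuple('shadow', ['i', 'j', 'k'])
--
-- def observations_strict(P_list,gEpG):
--     #triplets: images i and j project to image k
--     IJK={
--         k:[
--             Shadow(i, j, k)
--             for i, j in combinations(P_list, 2)
--             if ((i, k) in gEpG
--             and (j, k) in gEpG
--             and (i, j) in gEpG)]
--     for k in P_list}
--     return IJK
-- ===== SOURCE B (Python) =====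
-- from collections import namedtuple
--
-- Shadow = namedtuple('shadow', ['i', 'j', 'k'])
--
-- def observations_strict(P_list, gEpG):
--     # Per-k: restrict to neighbors of k first, then enumerate only pairs of neighbors.
--     E = set(gEpG)
--     IJK = {}
--     for k in P_list:
--         nbrs = [x for x in P_list if (x, k) in E]
--         obs = []
--         for idx, i in enumerate(nbrs):
--             for j in nbrs[idx + 1:]:
--                 if (i, j) in E:
--                     obs.append(Shadow(i, j, k))
--         IJK[k] = obs
--     return IJK
-- ===== Notes on version B (the rewrite author's own statement) =====
-- stated objective: faster
-- what changed: Instead of scanning all C(n,2) pairs of P_list for every k with three linear list-membership tests, B builds a hash set of edges once and, per k, first restricts P_list to k's in-neighbors and enumerates pairs only among those neighbors with O(1) set lookups.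
import Mathlib
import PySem

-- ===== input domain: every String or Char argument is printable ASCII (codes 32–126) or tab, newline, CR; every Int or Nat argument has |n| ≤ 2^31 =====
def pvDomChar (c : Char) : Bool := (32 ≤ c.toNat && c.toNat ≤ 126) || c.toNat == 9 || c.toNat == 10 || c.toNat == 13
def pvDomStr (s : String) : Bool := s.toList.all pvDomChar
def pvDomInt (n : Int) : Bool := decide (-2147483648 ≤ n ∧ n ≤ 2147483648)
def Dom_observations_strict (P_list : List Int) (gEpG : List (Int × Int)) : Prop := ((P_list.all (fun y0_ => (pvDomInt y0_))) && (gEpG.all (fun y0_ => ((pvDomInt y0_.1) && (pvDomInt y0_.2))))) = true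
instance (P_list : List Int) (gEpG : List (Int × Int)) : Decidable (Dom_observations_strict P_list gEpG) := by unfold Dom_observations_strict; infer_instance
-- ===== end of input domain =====

-- B restricts P_list to k's in-neighbors (via an edge set built once) before enumerating pairs;
-- A filters all pairs of P_list per k. Equal return value; B is asymptotically faster.

-- ===== PORT A =====
-- itertools.combinations(P_list, 2)
def combinations2 : List Int → List (Int × Int)
  | [] => []
  | x :: xs => xs.map (fun y => (x, y)) ++ combinations2 xs

-- the inner list comprehension for one k
def shadowsA (P_list : List Int) (gEpG : List (Int × Int)) (k : Int) : List (Int × Int × Int) :=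
  ((combinations2 P_list).filter
      (fun p => gEpG.contains (p.1, k) && (gEpG.contains (p.2, k) && gEpG.contains (p.1, p.2)))).map
    (fun p => (p.1, p.2, k))

def observations_strict (P_list : List Int) (gEpG : List (Int × Int)) : List (Int × List (Int × Int × Int)) :=
  (P_list.foldl (fun d k => d.insert k (shadowsA P_list gEpG k)) PySem.Dict.empty).items

-- ===== PORT B =====
-- the nested loop: for idx, i in enumerate(nbrs): for j in nbrs[idx+1:]: if (i,j) in E: append
def pairsB (E : List (Int × Int)) (k : Int) : List Int → List (Int × Int × Int)
  | [] => []
  | x :: xs => (xs.filter (fun y => E.contains (x, y))).map (fun y => (x, y, k)) ++ pairsB E k xs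

def observations_strict_alt (P_list : List Int) (gEpG : List (Int × Int)) : List (Int × List (Int × Int × Int)) :=
  let E := PySem.Set.ofList gEpG
  (P_list.foldl
      (fun d k =>
        let nbrs := P_list.filter (fun x => E.contains (x, k))
        d.insert k (pairsB E k nbrs))
      PySem.Dict.empty).items

-- ===== PRECONDITION & SPEC =====
def Spec_observations_strict (P_list : List Int) (gEpG : List (Int × Int)) (out : List (Int × List (Int × Int × Int))) : Prop := out = observations_strict_alt P_list gEpG
instance (P_list : List Int) (gEpG : List (Int × Int)) (out : List (Int × List (Int × Int × Int))) : Decidable (Spec_observations_strict P_list gEpG out) := by unfold Spec_observations_strict; infer_instance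

-- ===== CLAIM (what is proved, stated in full; the proofs are below) =====
def Claim_equal_observations_strict : Prop := ∀ (P_list : List Int) (gEpG : List (Int × Int)), Dom_observations_strict P_list gEpG → Spec_observations_strict P_list gEpG (observations_strict P_list gEpG)

-- ===== LEMMAS AND PROOFS =====

-- the set built from the edge list answers membership exactly like the list
theorem set_contains_eq (E : List (Int × Int)) (q : Int × Int) :
    (PySem.Set.ofList E).contains q = E.contains q := by
  rw [Bool.eq_iff_iff]
  simp [PySem.Set.mem_ofList]

-- B's neighbor-pair loop equals filtering all pairs by the (i,j) edge test
theorem pairsB_eq (E : List (Int × Int)) (k : Int) (xs : List Int) :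
    pairsB E k xs
      = ((combinations2 xs).filter (fun p => E.contains (p.1, p.2))).map (fun p => (p.1, p.2, k)) := by
  induction xs with
  | nil => rfl
  | cons x xs ih =>
      simp [pairsB, combinations2, List.filter_append, List.filter_map, List.map_map,
        Function.comp_def, ih]

-- pairs of a filtered list = pairs filtered componentwise
theorem combinations2_filter (p : Int → Bool) (xs : List Int) :
    combinations2 (xs.filter p) = (combinations2 xs).filter (fun q => p q.1 && p q.2) := by
  induction xs with
  | nil => rfl
  | cons x xs ih =>
      by_cases h : p x = true
      · simp [combinations2, h, List.filter_append, List.filter_map, Function.comp_def, ih]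
      · simp only [Bool.not_eq_true] at h
        simp [combinations2, h, List.filter_append, List.filter_map, Function.comp_def, ih]

-- the per-key values agree
theorem shadows_eq (P_list : List Int) (gEpG : List (Int × Int)) (k : Int) :
    (let E := PySem.Set.ofList gEpG
     pairsB E k (P_list.filter (fun x => E.contains (x, k))))
      = shadowsA P_list gEpG k := by
  simp only [pairsB_eq, combinations2_filter, shadowsA, List.filter_filter, set_contains_eq]
  congr 1
  apply List.filter_congr
  intro q _
  obtain ⟨a, b⟩ := q
  cases hq1 : gEpG.contains (a, k) <;> cases hq2 : gEpG.contains (b, k) <;>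
    cases hq3 : gEpG.contains (a, b) <;> simp_all

-- ===== VERDICT (by name: the statement is the Claim_ definition above) =====
theorem observations_strict_spec : Claim_equal_observations_strict := by
  intro P_list gEpG _
  unfold Spec_observations_strict observations_strict observations_strict_alt
  congr 1
  apply PySem.List.foldl_congr_mem
  intro d k _
  rw [← shadows_eq]
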